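-- pv_equiv track=rewrite | github.com/Createyourfreeacc/factorio-re-toolkit | tools/annotate_decompiled.py | _strip_previous_annotation
-- ===== SOURCE A (Python) =====
-- ANNOTATION_MARKER = "// ANNOTATED: source"
--
-- def _strip_previous_annotation(text: str) -> str:
--     # Remove the block from the previous --- line through the next --- line
--     # surrounding the marker.
--     lines = text.splitlines(keepends=True)
--     out = []
--     i = 0
--     while i < len(lines):
--         ln = lines[i]
--         if ln.startswith("// ----") and i + 1 < len(lines) and ANNOTATION_MARKER in lines[i + 1]:
--             # find closing "// ----"
--             j = i + 1
--             while j < len(lines) and not lines[j].startswith("// ----"):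
--                 j += 1
--             i = j + 1  # skip closing line
--             continue
--         out.append(ln)
--         i += 1
--     return "".join(out)
-- ===== SOURCE B (Python) =====
-- ANNOTATION_MARKER = "// ANNOTATED: source"
--
-- def _strip_previous_annotation(text: str) -> str:
--     # Single linear pass with a skipping flag over (line, next-line) pairs.
--     lines = text.splitlines(keepends=True)
--     nxts = lines[1:] + [None]
--     out = []
--     skipping = False
--     for ln, nxt in zip(lines, nxts):
--         if skipping:
--             if ln.startswith("// ----"):
--                 skipping = False
--         elif ln.startswith("// ----") and nxt is not None and ANNOTATION_MARKER in nxt: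
--             skipping = True
--         else:
--             out.append(ln)
--     return "".join(out)
-- ===== Notes on version B (the rewrite author's own statement) =====
-- stated objective: simpler
-- what changed: Replaced the index-driven while loop with an inner close-finding scan and index jump by a single linear pass over (line, next-line) pairs carrying a boolean skipping flag.
import Mathlib
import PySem

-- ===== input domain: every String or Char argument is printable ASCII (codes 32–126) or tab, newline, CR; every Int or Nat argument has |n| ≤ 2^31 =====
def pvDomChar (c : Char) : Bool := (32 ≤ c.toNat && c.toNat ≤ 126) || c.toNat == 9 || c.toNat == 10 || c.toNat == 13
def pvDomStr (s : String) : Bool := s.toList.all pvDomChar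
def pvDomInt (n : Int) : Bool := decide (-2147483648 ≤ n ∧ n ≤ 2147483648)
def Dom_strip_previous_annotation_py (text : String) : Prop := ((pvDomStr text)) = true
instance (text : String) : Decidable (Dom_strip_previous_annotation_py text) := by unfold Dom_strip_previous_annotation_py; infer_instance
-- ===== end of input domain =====

-- B replaces A's nested index/while scan by one linear pass with a skipping flag (objective: simpler).

-- shared helpers: both Pythons call text.splitlines(keepends=True) and the same startswith/in tests
def pvMarker : List Char := "// ANNOTATED: source".toList
def pvDash : List Char := "// ----".toList
def pvStarts (ln : List Char) : Bool := PySem.Chars.startswith ln pvDash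

-- splitlines(keepends=True), ported by hand over List Char; exact on Dom_ (whose only
-- line-break characters are '\n', '\r' and "\r\n" — no \x0b/\x0c/\x1c-\x1e/\x85/U+2028/U+2029).
def pvSplitKeep : List Char → List Char → List (List Char)
  | [], acc => if acc.isEmpty then [] else [acc.reverse]
  | '\r' :: '\n' :: rest, acc => (acc.reverse ++ ['\r', '\n']) :: pvSplitKeep rest []
  | '\n' :: rest, acc => (acc.reverse ++ ['\n']) :: pvSplitKeep rest []
  | '\r' :: rest, acc => (acc.reverse ++ ['\r']) :: pvSplitKeep rest []
  | c :: rest, acc => pvSplitKeep rest (c :: acc)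

-- ===== PORT A =====
-- inner "find closing // ----" while loop: returns lines[j+1:] (or [] when it runs off the end)
def pvDropToClose : List (List Char) → List (List Char)
  | [] => []
  | l :: ls => if pvStarts l then ls else pvDropToClose ls

theorem pvDropToClose_length_le (ls : List (List Char)) :
    (pvDropToClose ls).length ≤ ls.length := by
  induction ls with
  | nil => simp [pvDropToClose]
  | cons l ls ih =>
    simp only [pvDropToClose]
    split
    · simp
    · exact Nat.le_trans ih (Nat.le_succ _)

-- A's outer while loop, the index i represented as the suffix lines[i:]
def pvLoopA : List (List Char) → List (List Char)
  | [] => []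
  | ln :: rest =>
    if pvStarts ln && (match rest with
        | nxt :: _ => PySem.Chars.isIn pvMarker nxt
        | [] => false) then
      pvLoopA (pvDropToClose rest)
    else
      ln :: pvLoopA rest
termination_by ls => ls.length
decreasing_by
  · exact Nat.lt_succ_of_le (pvDropToClose_length_le rest)
  · simp

def strip_previous_annotation_py (text : String) : String :=
  String.ofList (PySem.Chars.join [] (pvLoopA (pvSplitKeep text.toList [])))

-- ===== PORT B =====
def pvStepB (st : Bool × List (List Char)) (p : List Char × Option (List Char)) :
    Bool × List (List Char) :=
  let (skipping, out) := st
  let (ln, nxt) := p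
  if skipping then
    (if pvStarts ln then false else true, out)
  else if pvStarts ln && (match nxt with
      | some n => PySem.Chars.isIn pvMarker n
      | none => false) then
    (true, out)
  else
    (skipping, out ++ [ln])

def strip_previous_annotation_py_alt (text : String) : String :=
  let lines := pvSplitKeep text.toList []
  let pairs := lines.zip (lines.tail.map some ++ [none])
  String.ofList (PySem.Chars.join [] (pairs.foldl pvStepB (false, [])).2)

-- ===== PRECONDITION & SPEC =====
def Spec_strip_previous_annotation_py (text : String) (out : String) : Prop := out = strip_previous_annotation_py_alt text
instance (text : String) (out : String) : Decidable (Spec_strip_previous_annotation_py text out) := by unfold Spec_strip_previous_annotation_py; infer_instance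

-- ===== CLAIM (what is proved, stated in full; the proofs are below) =====
def Claim_equal_strip_previous_annotation_py : Prop := ∀ (text : String), Dom_strip_previous_annotation_py text → Spec_strip_previous_annotation_py text (strip_previous_annotation_py text)

-- ===== LEMMAS AND PROOFS =====

def pvPairs (ls : List (List Char)) : List (List Char × Option (List Char)) :=
  ls.zip (ls.tail.map some ++ [none])

theorem pvPairs_cons (l : List Char) (ls : List (List Char)) :
    pvPairs (l :: ls) = (l, ls.head?) :: pvPairs ls := by
  cases ls <;> rfl

theorem pvFoldB_eq (ls : List (List Char)) :
    ∀ (out : List (List Char)) (skipping : Bool),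
      ((pvPairs ls).foldl pvStepB (skipping, out)).2 =
        out ++ (if skipping then pvLoopA (pvDropToClose ls) else pvLoopA ls) := by
  induction ls with
  | nil =>
    intro out skipping
    cases skipping <;> simp [pvPairs, pvLoopA, pvDropToClose]
  | cons l ls ih =>
    intro out skipping
    rw [pvPairs_cons]
    cases skipping with
    | true =>
      simp only [List.foldl_cons, pvStepB, pvDropToClose]
      by_cases h : pvStarts l = true
      · simp [h, ih]
      · simp [h, ih]
    | false =>
      by_cases h : (pvStarts l && (match ls.head? with
          | some n => PySem.Chars.isIn pvMarker n
          | none => false)) = true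
      · have hA : pvLoopA (l :: ls) = pvLoopA (pvDropToClose ls) := by
          rw [pvLoopA.eq_def]
          cases ls <;> simp_all
        simp only [List.foldl_cons, pvStepB]
        rw [if_neg (by simp), if_pos (by cases ls <;> simpa using h)]
        simp [ih, hA]
      · have hA : pvLoopA (l :: ls) = l :: pvLoopA ls := by
          rw [pvLoopA.eq_def]
          cases ls <;> simp_all
        simp only [List.foldl_cons, pvStepB]
        rw [if_neg (by simp), if_neg (by cases ls <;> simpa using h)]
        simp [ih, hA]

-- ===== VERDICT (by name: the statement is the Claim_ definition above) =====
theorem strip_previous_annotation_py_spec : Claim_equal_strip_previous_annotation_py := by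
  intro text _
  unfold Spec_strip_previous_annotation_py strip_previous_annotation_py strip_previous_annotation_py_alt
  show _ = String.ofList (PySem.Chars.join []
      ((pvPairs (pvSplitKeep text.toList [])).foldl pvStepB (false, [])).2)
  rw [pvFoldB_eq]
  simp
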